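-- pv_equiv track=rewrite | github.com/eamtcPROG/CS | Lab1/main.py | cezar_encrypt_2keys
-- ===== SOURCE A (Python) =====
-- ALPHABET = "ABCDEFGHIJKLMNOPQRSTUVWXYZ"
--
-- def generate_shifted_alphabet(key2):
--     unique_chars = ""
--     for char in key2:
--         if char not in unique_chars:
--             unique_chars += char
--
--     shifted = unique_chars
--     for char in ALPHABET:
--         if char not in unique_chars:
--             shifted += char
--
--     return shifted
--
-- def cezar_encrypt(text, key):
--     source_alphabet = ALPHABET
--     result = ""
--     for char in text:
--         idx = source_alphabet.index(char)
--         result += source_alphabet[(idx + key) % 26]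
--     return result
--
-- def cezar_encrypt_2keys(text, key1, key2):
--     encrypted_text = cezar_encrypt(text, key1)
--     result = ""
--     source_alphabet = ALPHABET
--     key2_alphabet = generate_shifted_alphabet(key2)
--     for char in encrypted_text:
--         idx = source_alphabet.index(char)
--         result += key2_alphabet[idx]
--     return result
-- ===== SOURCE B (Python) =====
-- ALPHABET = "ABCDEFGHIJKLMNOPQRSTUVWXYZ"
--
-- def cezar_encrypt_2keys(text, key1, key2):
--     # keyed alphabet: first occurrences of key2's chars, then the rest of ALPHABET
--     key2_alphabet = "".join(dict.fromkeys(key2 + ALPHABET))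
--     # one combined 26-entry table: shift by key1 then substitute
--     combined = [key2_alphabet[(i + key1) % 26] for i in range(26)]
--     return "".join(combined[ALPHABET.index(ch)] for ch in text)
-- ===== Notes on version B (the rewrite author's own statement) =====
-- stated objective: simpler
-- what changed: B builds the keyed alphabet with dict.fromkeys(key2 + ALPHABET) and precomputes one combined 26-entry table combined[i] = key2_alphabet[(i + key1) % 26], replacing A's two sequential full passes (Caesar pass producing an intermediate string, then a substitution pass) with a single table-driven pass over text.
import Mathlib
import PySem

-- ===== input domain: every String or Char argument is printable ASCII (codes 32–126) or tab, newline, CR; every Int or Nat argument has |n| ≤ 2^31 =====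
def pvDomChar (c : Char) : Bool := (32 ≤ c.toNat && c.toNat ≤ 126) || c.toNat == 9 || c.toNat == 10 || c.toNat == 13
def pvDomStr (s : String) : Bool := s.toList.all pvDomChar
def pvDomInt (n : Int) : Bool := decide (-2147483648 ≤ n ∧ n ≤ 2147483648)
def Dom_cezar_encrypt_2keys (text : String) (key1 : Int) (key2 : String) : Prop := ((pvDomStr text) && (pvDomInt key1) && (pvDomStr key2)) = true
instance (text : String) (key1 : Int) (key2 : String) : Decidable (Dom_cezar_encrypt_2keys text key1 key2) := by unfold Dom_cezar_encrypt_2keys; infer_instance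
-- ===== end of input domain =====

-- B merges A's two transformation passes (Caesar shift, then keyed substitution) into one
-- table-driven pass over the text; equivalence is proved on texts of uppercase letters
-- (on other texts both Pythons raise ValueError).


-- ===== PORT A =====
def pvALPHA : List Char := "ABCDEFGHIJKLMNOPQRSTUVWXYZ".toList

-- generate_shifted_alphabet: dedup key2 by hand, then append unused alphabet letters
def pvGenShifted (key2 : List Char) : List Char :=
  let unique := key2.foldl (fun u c => if c ∈ u then u else u ++ [c]) []
  pvALPHA.foldl (fun s c => if c ∈ unique then s else s ++ [c]) unique

-- cezar_encrypt: per-char index lookup and shifted re-index.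
-- `index?` = none is Python's ValueError (excluded by Pre_); the 'none => res' branch is dead there.
-- The index (idx+key) % 26 is always in range, so pyGetD is exact.
def pvCezarEncrypt (text : List Char) (key : Int) : List Char :=
  text.foldl (fun res c =>
    match PySem.List.index? pvALPHA c with
    | none => res
    | some i => res ++ [PySem.List.pyGetD pvALPHA (PySem.Int.mod ((i : Int) + key) 26) 'A']) []

def cezar_encrypt_2keys (text : String) (key1 : Int) (key2 : String) : String :=
  let encrypted := pvCezarEncrypt text.toList key1
  let key2_alphabet := pvGenShifted key2.toList
  String.ofList (encrypted.foldl (fun res c =>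
    match PySem.List.index? pvALPHA c with
    | none => res
    | some i => res ++ [PySem.List.pyGetD key2_alphabet (i : Int) 'A']) [])

-- ===== PORT B =====
-- "".join(dict.fromkeys(key2 + ALPHABET))
def pvKeyedAlphabet (key2 : List Char) : List Char := PySem.List.dedup (key2 ++ pvALPHA)

def cezar_encrypt_2keys_alt (text : String) (key1 : Int) (key2 : String) : String :=
  let key2_alphabet := pvKeyedAlphabet key2.toList
  let combined := (PySem.List.pyRange 0 26 1).map
    (fun i => PySem.List.pyGetD key2_alphabet (PySem.Int.mod (i + key1) 26) 'A')
  String.ofList (text.toList.map (fun c =>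
    match PySem.List.index? pvALPHA c with
    | none => 'A'  -- Python raises ValueError here; excluded by Pre_
    | some i => PySem.List.pyGetD combined (i : Int) 'A'))

-- ===== PRECONDITION & SPEC =====
-- Pre_ excludes exactly the texts containing a character outside A–Z, on which
-- ALPHABET.index raises ValueError in both A and B.
def Pre_cezar_encrypt_2keys (text : String) (key1 : Int) (key2 : String) : Prop :=
  text.toList.all (fun c => pvALPHA.contains c) = true
instance (text : String) (key1 : Int) (key2 : String) : Decidable (Pre_cezar_encrypt_2keys text key1 key2) := by unfold Pre_cezar_encrypt_2keys; infer_instance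

def pvWitness_cezar_encrypt_2keys : String × Int × String := ("HELLO", 3, "KEY")

def Spec_cezar_encrypt_2keys (text : String) (key1 : Int) (key2 : String) (out : String) : Prop := out = cezar_encrypt_2keys_alt text key1 key2
instance (text : String) (key1 : Int) (key2 : String) (out : String) : Decidable (Spec_cezar_encrypt_2keys text key1 key2 out) := by unfold Spec_cezar_encrypt_2keys; infer_instance

-- ===== CLAIM (what is proved, stated in full; the proofs are below) =====
def Claim_equal_cezar_encrypt_2keys : Prop := ∀ (text : String) (key1 : Int) (key2 : String), Dom_cezar_encrypt_2keys text key1 key2 → Pre_cezar_encrypt_2keys text key1 key2 → Spec_cezar_encrypt_2keys text key1 key2 (cezar_encrypt_2keys text key1 key2)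

-- ===== LEMMAS AND PROOFS =====

-- index of c in the alphabet (meaningful for c ∈ pvALPHA)
def pvIdx (c : Char) : Nat := (PySem.List.index? pvALPHA c).getD 0

lemma pvIdx_some {c : Char} (h : c ∈ pvALPHA) :
    PySem.List.index? pvALPHA c = some (pvIdx c) := by
  have hs : (PySem.List.index? pvALPHA c).isSome := (PySem.List.index?_isSome_iff _ _).mpr h
  obtain ⟨n, hn⟩ := Option.isSome_iff_exists.mp hs
  unfold pvIdx
  rw [hn]
  rfl

lemma pvIdx_lt (c : Char) (h : c ∈ pvALPHA) : pvIdx c < 26 := by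
  obtain ⟨hk, -, -⟩ := PySem.List.getElem_of_index?_eq_some (pvIdx_some h)
  have h26 : pvALPHA.length = 26 := by decide
  omega

lemma pvIdx_roundtrip : ∀ n ∈ List.range 26,
    PySem.List.index? pvALPHA (pvALPHA.getD n 'A') = some n := by decide

lemma pvALPHA_getD_mem : ∀ n ∈ List.range 26, pvALPHA.getD n 'A' ∈ pvALPHA := by decide

-- A's keyed-alphabet second loop (membership tested against the FIXED 'unique') equals
-- the accumulator-membership fold, given the scanned list is Nodup and disjoint from t.
lemma pvFoldStatic (l : List Char) (u t : List Char) (hl : l.Nodup)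
    (ht : ∀ c ∈ l, c ∉ t) :
    l.foldl (fun s c => if c ∈ u then s else s ++ [c]) (u ++ t)
      = l.foldl (fun s c => if c ∈ s then s else s ++ [c]) (u ++ t) := by
  induction l generalizing t with
  | nil => rfl
  | cons c l ih =>
    have hcl : c ∉ l := (List.nodup_cons.mp hl).1
    have hl' : l.Nodup := (List.nodup_cons.mp hl).2
    have hct : c ∉ t := ht c (List.mem_cons_self ..)
    by_cases hcu : c ∈ u
    · simp only [List.foldl_cons, if_pos hcu, if_pos (List.mem_append.mpr (Or.inl hcu))]
      exact ih t hl' (fun d hd => ht d (List.mem_cons_of_mem _ hd))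
    · have hcs : c ∉ u ++ t := by
        intro hmem; rcases List.mem_append.mp hmem with h | h
        · exact hcu h
        · exact hct h
      simp only [List.foldl_cons, if_neg hcu, if_neg hcs]
      have := ih (t ++ [c]) hl' (fun d hd => by
        intro hmem; rcases List.mem_append.mp hmem with h | h
        · exact ht d (List.mem_cons_of_mem _ hd) h
        · simp at h; exact hcl (h ▸ hd))
      simpa [List.append_assoc] using this

-- A's generate_shifted_alphabet computes B's dict.fromkeys dedup of key2 ++ ALPHABET.
lemma pvGenShifted_eq (key2 : List Char) : pvGenShifted key2 = pvKeyedAlphabet key2 := by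
  have hset : ∀ (init l : List Char),
      l.foldl (fun u c => if c ∈ u then u else u ++ [c]) init = l.foldl PySem.Set.add init :=
    fun init l => PySem.List.foldl_congr_mem _ _ _ _ (fun acc x _ => (PySem.Set.add_eq_ite acc x).symm)
  have hU := hset [] key2
  show pvALPHA.foldl
      (fun s c => if c ∈ (key2.foldl (fun u c => if c ∈ u then u else u ++ [c]) []) then s else s ++ [c])
      (key2.foldl (fun u c => if c ∈ u then u else u ++ [c]) [])
    = pvKeyedAlphabet key2
  rw [pvKeyedAlphabet, PySem.List.dedup_eq_ofList, PySem.Set.ofList_eq_foldl, List.foldl_append,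
    ← hU, ← hset]
  have hstatic := pvFoldStatic pvALPHA
    (key2.foldl (fun u c => if c ∈ u then u else u ++ [c]) []) [] (by decide) (by simp)
  simpa using hstatic

-- A's first loop, as a map
lemma pvEncLoop (l : List Char) (key : Int) (h : ∀ c ∈ l, c ∈ pvALPHA) :
    pvCezarEncrypt l key
      = l.map (fun c => PySem.List.pyGetD pvALPHA (PySem.Int.mod (((pvIdx c : Nat) : Int) + key) 26) 'A') := by
  unfold pvCezarEncrypt
  rw [PySem.List.foldl_congr_mem _ _
    (fun res c => res ++ [PySem.List.pyGetD pvALPHA (PySem.Int.mod (((pvIdx c : Nat) : Int) + key) 26) 'A'])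
    [] (fun acc c hc => by rw [pvIdx_some (h c hc)])]
  simp only [PySem.List.foldl_append_singleton_eq_map, List.nil_append]

-- A's second loop, as a map
lemma pvSubLoop (l : List Char) (k2a : List Char) (h : ∀ c ∈ l, c ∈ pvALPHA) :
    l.foldl (fun res c =>
      match PySem.List.index? pvALPHA c with
      | none => res
      | some i => res ++ [PySem.List.pyGetD k2a ((i : Nat) : Int) 'A']) []
    = l.map (fun c => PySem.List.pyGetD k2a ((pvIdx c : Nat) : Int) 'A') := by
  rw [PySem.List.foldl_congr_mem _ _
    (fun res c => res ++ [PySem.List.pyGetD k2a ((pvIdx c : Nat) : Int) 'A'])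
    [] (fun acc c hc => by rw [pvIdx_some (h c hc)])]
  simp only [PySem.List.foldl_append_singleton_eq_map, List.nil_append]

-- the composed A-side character transform, rewritten to B's table index
lemma pvCompose (key1 : Int) (k2a : List Char) (c : Char) (hc : c ∈ pvALPHA) :
    PySem.List.pyGetD k2a
      ((pvIdx (PySem.List.pyGetD pvALPHA (PySem.Int.mod (((pvIdx c : Nat) : Int) + key1) 26) 'A') : Nat) : Int) 'A'
    = PySem.List.pyGetD k2a (PySem.Int.mod (((pvIdx c : Nat) : Int) + key1) 26) 'A' := by
  set m : Int := PySem.Int.mod (((pvIdx c : Nat) : Int) + key1) 26 with hm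
  have h0 : 0 ≤ m := PySem.Int.mod_nonneg _ (by norm_num)
  have h26 : m < 26 := PySem.Int.mod_lt _ (by norm_num)
  have hmn : m = ((m.toNat : Nat) : Int) := (Int.toNat_of_nonneg h0).symm
  have hlt : m.toNat < 26 := by omega
  have hget : PySem.List.pyGetD pvALPHA m 'A' = pvALPHA.getD m.toNat 'A' := by
    rw [hmn]; exact PySem.List.pyGetD_natCast _ _ _
  have hidx : pvIdx (PySem.List.pyGetD pvALPHA m 'A') = m.toNat := by
    rw [hget]; unfold pvIdx; rw [pvIdx_roundtrip m.toNat (List.mem_range.mpr hlt)]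
    rfl
  rw [hidx, ← hmn]

-- B's combined table, evaluated at an in-range index
lemma pvCombined_get (key1 : Int) (k2a : List Char) (n : Nat) (hn : n < 26) :
    PySem.List.pyGetD ((PySem.List.pyRange 0 26 1).map
      (fun i => PySem.List.pyGetD k2a (PySem.Int.mod (i + key1) 26) 'A')) ((n : Nat) : Int) 'A'
    = PySem.List.pyGetD k2a (PySem.Int.mod (((n : Nat) : Int) + key1) 26) 'A' := by
  rw [PySem.List.pyGetD_natCast]
  rw [List.getD_eq_getElem _ _ (by
    simpa [PySem.List.length_pyRange_one] using hn)]
  rw [List.getElem_map, PySem.List.getElem_pyRange_one]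
  norm_num

-- ===== VERDICT (by name: the statement is the Claim_ definition above) =====
theorem cezar_encrypt_2keys_spec : Claim_equal_cezar_encrypt_2keys := by
  intro text key1 key2 _ hpre0
  have hpre : ∀ c ∈ text.toList, c ∈ pvALPHA := by
    intro c hc
    have := List.all_eq_true.mp hpre0 c hc
    simpa using this
  unfold Spec_cezar_encrypt_2keys
  simp only [cezar_encrypt_2keys, cezar_encrypt_2keys_alt]
  rw [pvGenShifted_eq]
  rw [pvEncLoop text.toList key1 hpre]
  rw [pvSubLoop _ (pvKeyedAlphabet key2.toList) (by
    intro c hc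
    obtain ⟨d, hd, hdc⟩ := List.mem_map.mp hc
    subst hdc
    have h0 : 0 ≤ PySem.Int.mod (((pvIdx d : Nat) : Int) + key1) 26 := PySem.Int.mod_nonneg _ (by norm_num)
    have h26 : PySem.Int.mod (((pvIdx d : Nat) : Int) + key1) 26 < 26 := PySem.Int.mod_lt _ (by norm_num)
    have hmn : PySem.Int.mod (((pvIdx d : Nat) : Int) + key1) 26
        = (((PySem.Int.mod (((pvIdx d : Nat) : Int) + key1) 26).toNat : Nat) : Int) :=
      (Int.toNat_of_nonneg h0).symm
    rw [hmn, PySem.List.pyGetD_natCast]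
    exact pvALPHA_getD_mem _ (List.mem_range.mpr (by omega)))]
  rw [List.map_map]
  congr 1
  refine List.map_congr_left ?_
  intro c hc
  have hmem := hpre c hc
  simp only [Function.comp]
  rw [pvIdx_some hmem]
  rw [pvCompose key1 (pvKeyedAlphabet key2.toList) c hmem]
  exact (pvCombined_get key1 (pvKeyedAlphabet key2.toList) (pvIdx c) (pvIdx_lt c hmem)).symm
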